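-- pv_equiv track=rewrite | github.com/saiprasanth-git/repomind | repomind/backend/app/engines/long_context_engine.py | _deduplicate_overlapping_chunks
-- ===== SOURCE A (Python) =====
-- def _deduplicate_overlapping_chunks(parts: list[str]) -> str:
--     """
--     Joins overlapping chunks while minimizing duplication at boundaries.
--
--     When we split a file into chunks with overlap, adjacent chunks share
--     some text. This function stitches them back together cleanly.
--
--     Simple heuristic: find the longest common suffix/prefix between
--     adjacent chunks and remove the duplicate.
--     """
--     if not parts:
--         return ""
--     if len(parts) == 1:
--         return parts[0]
--
--     result = parts[0]
--     for next_part in parts[1:]: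
--         # Find overlap: look for the longest suffix of `result` that is a
--         # prefix of `next_part`
--         overlap_len = 0
--         max_overlap = min(len(result), len(next_part), 400)  # cap at 400 chars
--
--         for i in range(max_overlap, 0, -1):
--             if result.endswith(next_part[:i]):
--                 overlap_len = i
--                 break
--
--         result = result + next_part[overlap_len:]
--
--     return result
-- ===== SOURCE B (Python) =====
-- def _overlap(text: str, pattern: str) -> int:
--     """Length of the longest prefix of `pattern` that is a suffix of `text`,
--     computed by running `text` through the KMP prefix-function automaton."""
--     m = len(pattern)
--     if m == 0:
--         return 0
--     fail = [0] * m
--     k = 0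
--     for i in range(1, m):
--         while k and pattern[i] != pattern[k]:
--             k = fail[k - 1]
--         if pattern[i] == pattern[k]:
--             k += 1
--         fail[i] = k
--     k = 0
--     for c in text:
--         if k == m:
--             k = fail[k - 1]
--         while k and c != pattern[k]:
--             k = fail[k - 1]
--         if c == pattern[k]:
--             k += 1
--     return k
--
--
-- def _deduplicate_overlapping_chunks(parts: list[str]) -> str:
--     if not parts:
--         return ""
--     result = parts[0]
--     for next_part in parts[1:]:
--         m = min(len(result), len(next_part), 400)
--         overlap_len = _overlap(result[len(result) - m:], next_part[:m])
--         result = result + next_part[overlap_len:]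
--     return result
-- ===== Notes on version B (the rewrite author's own statement) =====
-- stated objective: alternative
-- what changed: Per adjacent pair, A scans candidate overlap lengths downward from the 400-cap testing result.endswith(next_part[:i]) until the first hit; B instead builds the KMP prefix-function (failure table) of next_part's capped prefix and runs the boundary tail of result through that automaton, the final automaton state being the overlap length.
import Mathlib
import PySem

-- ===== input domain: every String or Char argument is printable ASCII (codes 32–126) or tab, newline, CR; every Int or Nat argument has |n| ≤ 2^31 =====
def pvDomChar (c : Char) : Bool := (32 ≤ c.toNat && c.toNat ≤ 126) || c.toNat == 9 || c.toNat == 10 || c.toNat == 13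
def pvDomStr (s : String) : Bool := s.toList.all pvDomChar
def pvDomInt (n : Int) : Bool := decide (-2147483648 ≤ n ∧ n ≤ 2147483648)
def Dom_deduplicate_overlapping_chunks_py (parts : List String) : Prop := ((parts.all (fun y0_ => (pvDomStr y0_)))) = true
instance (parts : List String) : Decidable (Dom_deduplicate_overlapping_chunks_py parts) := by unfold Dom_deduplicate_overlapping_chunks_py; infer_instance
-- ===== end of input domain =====

-- B replaces A's per-pair descending endswith scan by a KMP prefix-function automaton
-- over the boundary region (objective: alternative algorithm, same exact result).

-- ===== PORT A =====
-- `for i in range(max_overlap, 0, -1): if result.endswith(next_part[:i]): overlap_len = i; break`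
def pvFindOverlapA (result next_part : List Char) : List Int → Int
  | [] => 0
  | i :: rest =>
      if PySem.Chars.endswith result (PySem.Chars.slice next_part none (some i)) then i
      else pvFindOverlapA result next_part rest

-- one iteration of A's outer loop body (on code-point lists)
def pvStepA (result next_part : List Char) : List Char :=
  let max_overlap : Int := min (min (result.length : Int) (next_part.length : Int)) 400
  let overlap_len : Int := pvFindOverlapA result next_part (PySem.List.pyRange max_overlap 0 (-1))
  result ++ PySem.Chars.slice next_part (some overlap_len) none

def deduplicate_overlapping_chunks_py (parts : List String) : String :=
  if parts = [] then ""
  else if parts.length = 1 then parts.headD ""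
  else String.ofList ((parts.drop 1).foldl (fun res np => pvStepA res np.toList) (parts.headD "").toList)

-- ===== PORT B =====
-- `while k and c != pattern[k]: k = fail[k-1]` — the fuel (first Nat) only makes the
-- loop total; it equals the entry value of k, which bounds the strictly decreasing descent.
def pvKmpWhile (p : List Char) (fl : List Nat) (c : Char) : Nat → Nat → Nat
  | _, 0 => 0
  | 0, k + 1 => k + 1
  | fuel + 1, k + 1 =>
      if c = p.getD (k + 1) ' ' then k + 1 else pvKmpWhile p fl c fuel (fl.getD k 0)

-- `fail = [0]*m; k = 0; for i in range(1, m): … ; fail[i] = k`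
def pvFailFold (p : List Char) (m : Nat) : List Nat × Nat :=
  (PySem.List.pyRange 1 (m : Int) 1).foldl
    (fun (st : List Nat × Nat) (i : Int) =>
      let c := p.getD i.toNat ' '
      let k := pvKmpWhile p st.1 c st.2 st.2
      let k := if c = p.getD k ' ' then k + 1 else k
      (st.1.set i.toNat k, k))
    (List.replicate m 0, 0)

-- `k = 0; for c in text: if k == m: k = fail[k-1]; while …; if c == pattern[k]: k += 1`
def pvKmpRun (p : List Char) (fl : List Nat) (m : Nat) (text : List Char) : Nat :=
  text.foldl
    (fun k c =>
      let k := if k = m then fl.getD (k - 1) 0 else k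
      let k := pvKmpWhile p fl c k k
      if c = p.getD k ' ' then k + 1 else k)
    0

def pvOverlapB (text pattern : List Char) : Nat :=
  let m := pattern.length
  if m = 0 then 0
  else pvKmpRun pattern (pvFailFold pattern m).1 m text

-- one iteration of B's outer loop body (on code-point lists)
def pvStepB (result next_part : List Char) : List Char :=
  let m : Nat := min (min result.length next_part.length) 400
  let overlap_len := pvOverlapB (result.drop (result.length - m)) (next_part.take m)
  result ++ next_part.drop overlap_len

def deduplicate_overlapping_chunks_py_alt (parts : List String) : String :=
  if parts = [] then ""
  else String.ofList ((parts.drop 1).foldl (fun res np => pvStepB res np.toList) (parts.headD "").toList)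

-- ===== PRECONDITION & SPEC =====
def Spec_deduplicate_overlapping_chunks_py (parts : List String) (out : String) : Prop := out = deduplicate_overlapping_chunks_py_alt parts
instance (parts : List String) (out : String) : Decidable (Spec_deduplicate_overlapping_chunks_py parts out) := by unfold Spec_deduplicate_overlapping_chunks_py; infer_instance

-- ===== CLAIM (what is proved, stated in full; the proofs are below) =====
def Claim_equal_deduplicate_overlapping_chunks_py : Prop := ∀ (parts : List String), Dom_deduplicate_overlapping_chunks_py parts → Spec_deduplicate_overlapping_chunks_py parts (deduplicate_overlapping_chunks_py parts)

-- ===== LEMMAS AND PROOFS =====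

-- proof-side maximum: largest j ≤ b with pattern.take j a suffix of seen
def pvDescendB (seen pattern : List Char) : Nat → Nat
  | 0 => 0
  | j + 1 =>
      if PySem.Chars.endswith seen (pattern.take (j + 1)) then j + 1
      else pvDescendB seen pattern j

theorem pvDescendB_le (seen pattern : List Char) (b : Nat) : pvDescendB seen pattern b ≤ b := by
  induction b with
  | zero => simp [pvDescendB]
  | succ j ih =>
      unfold pvDescendB
      split
      · exact le_refl _
      · exact Nat.le_succ_of_le ih

theorem pvDescendB_suffix (seen pattern : List Char) (b : Nat) :
    pattern.take (pvDescendB seen pattern b) <:+ seen := by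
  induction b with
  | zero => simp [pvDescendB]
  | succ j ih =>
      unfold pvDescendB
      split
      · next h => exact (PySem.Chars.endswith_iff _ _).mp h
      · exact ih

theorem pvDescendB_max (seen pattern : List Char) (b j : Nat)
    (hj : j ≤ b) (hs : pattern.take j <:+ seen) : j ≤ pvDescendB seen pattern b := by
  induction b with
  | zero => simpa [pvDescendB] using hj
  | succ i ih =>
      unfold pvDescendB
      split
      · exact hj
      · next h =>
        have hji : j ≤ i := by
          rcases Nat.lt_or_ge j (i + 1) with h' | h'
          · omega
          · exfalso
            have : j = i + 1 := le_antisymm hj h'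
            exact h ((PySem.Chars.endswith_iff _ _).mpr (this ▸ hs))
        exact ih hji

theorem pvDescendB_congr (t1 p1 t2 p2 : List Char) (b : Nat)
    (h : ∀ j, 1 ≤ j → j ≤ b → (p1.take j <:+ t1 ↔ p2.take j <:+ t2)) :
    pvDescendB t1 p1 b = pvDescendB t2 p2 b := by
  induction b with
  | zero => simp [pvDescendB]
  | succ j ih =>
      unfold pvDescendB
      have hiff := h (j + 1) (by omega) (le_refl _)
      by_cases hc : p1.take (j + 1) <:+ t1
      · rw [if_pos ((PySem.Chars.endswith_iff _ _).mpr hc),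
          if_pos ((PySem.Chars.endswith_iff _ _).mpr (hiff.mp hc))]
      · rw [if_neg (fun hb => hc ((PySem.Chars.endswith_iff _ _).mp hb)),
          if_neg (fun hb => hc (hiff.mpr ((PySem.Chars.endswith_iff _ _).mp hb)))]
        exact ih (fun i h1 h2 => h i h1 (Nat.le_succ_of_le h2))

theorem pvDescendB_nil (p : List Char) (b : Nat) (hb : b ≤ p.length) :
    pvDescendB [] p b = 0 := by
  have h := pvDescendB_suffix [] p b
  have h2 := congrArg List.length (List.suffix_nil.mp h)
  simp only [List.length_take, List.length_nil] at h2
  have h4 := pvDescendB_le [] p b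
  omega

-- A's descending range scan computes the same maximum
theorem pvFindOverlapA_eq (r nx : List Char) (M : Nat) :
    pvFindOverlapA r nx (PySem.List.pyRange (M : Int) 0 (-1)) = ((pvDescendB r nx M : Nat) : Int) := by
  induction M with
  | zero => rw [PySem.List.pyRange_neg_one_eq_nil (by omega)]; simp [pvFindOverlapA, pvDescendB]
  | succ j ih =>
      rw [PySem.List.pyRange_neg_one_cons (by push_cast; omega)]
      unfold pvFindOverlapA pvDescendB
      have hsl : PySem.Chars.slice nx none (some ((j + 1 : Nat) : Int)) = nx.take (j + 1) := by
        rw [PySem.Chars.slice_eq_listSlice, PySem.List.slice_to_natCast]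
      push_cast at hsl ⊢
      rw [hsl]
      by_cases hc : nx.take (j + 1) <:+ r
      · rw [if_pos ((PySem.Chars.endswith_iff _ _).mpr hc),
          if_pos ((PySem.Chars.endswith_iff _ _).mpr hc)]
      · rw [if_neg (fun hb => hc ((PySem.Chars.endswith_iff _ _).mp hb)),
          if_neg (fun hb => hc ((PySem.Chars.endswith_iff _ _).mp hb))]
        push_cast at ih ⊢
        simpa using ih

-- shorter common suffixes transfer between a list and its length-m tail
theorem pvSuffix_tail_iff (r x : List Char) (m : Nat) (hm : m ≤ r.length)
    (hx : x.length ≤ m) : (x <:+ r ↔ x <:+ r.drop (r.length - m)) := by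
  constructor
  · intro h
    have h2 : r.drop (r.length - m) <:+ r := List.drop_suffix _ _
    exact List.suffix_of_suffix_length_le h h2 (by rw [List.length_drop]; omega)
  · intro h
    exact h.trans (List.drop_suffix _ _)

-- longest proper border of p.take K, expressed via pvDescendB
def pvLb (p : List Char) (K : Nat) : Nat := pvDescendB (p.take K) p (K - 1)

theorem pvLb_le (p : List Char) (K : Nat) : pvLb p K ≤ K - 1 := pvDescendB_le _ _ _

theorem pvLb_suffix (p : List Char) (K : Nat) : p.take (pvLb p K) <:+ p.take K :=
  pvDescendB_suffix _ _ _

theorem pvLb_max (p : List Char) (K j : Nat) (hj : j ≤ K - 1) (hs : p.take j <:+ p.take K) :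
    j ≤ pvLb p K := pvDescendB_max _ _ _ _ hj hs

-- suffix transfer: two prefixes of p that are both suffixes of t
theorem pvCH (p t : List Char) (K i : Nat) (hK : p.take K <:+ t) (hi : i ≤ K)
    (hKl : K ≤ p.length) (hs : p.take i <:+ t) : p.take i <:+ p.take K := by
  refine List.suffix_of_suffix_length_le hs hK ?_
  simp only [List.length_take]
  omega

-- p.take (j+1) as append of the last character
theorem pvTake_succ (p : List Char) (j : Nat) (hj : j < p.length) :
    p.take (j + 1) = p.take j ++ [p.getD j ' '] := by
  rw [List.take_add_one]
  simp [List.getElem?_eq_getElem hj, List.getD]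

-- x ++ [a] suffix of y ++ [b] iff a = b and x suffix of y
theorem pvSuffix_append_singleton (x y : List Char) (a b : Char) :
    x ++ [a] <:+ y ++ [b] ↔ a = b ∧ x <:+ y := by
  constructor
  · rintro ⟨u, hu⟩
    rw [← List.append_assoc] at hu
    have h := List.append_inj' hu (by simp)
    refine ⟨by simpa using h.2, u, h.1⟩
  · rintro ⟨rfl, u, hu⟩
    exact ⟨u, by rw [← List.append_assoc, hu]⟩

-- characterization of prefixes of p that are suffixes of t ++ [c]
theorem pvF1 (p t : List Char) (c : Char) (j : Nat) (h1 : 1 ≤ j) (hj : j ≤ p.length) :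
    (p.take j <:+ t ++ [c] ↔ p.take (j - 1) <:+ t ∧ c = p.getD (j - 1) ' ') := by
  obtain ⟨i, rfl⟩ : ∃ i, j = i + 1 := ⟨j - 1, by omega⟩
  rw [pvTake_succ p i (by omega)]
  rw [pvSuffix_append_singleton]
  simp only [Nat.add_sub_cancel]
  constructor
  · rintro ⟨h, h2⟩; exact ⟨h2, h.symm⟩
  · rintro ⟨h2, h⟩; exact ⟨h.symm, h2⟩

-- the while-loop descent: stays in the border chain, exits correctly, skips no candidate
theorem pvKmpWhile_spec (p t : List Char) (fl : List Nat) (c : Char) :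
    ∀ fuel k0, k0 ≤ fuel → k0 < p.length → p.take k0 <:+ t →
    (∀ v, 1 ≤ v → v ≤ k0 → fl.getD (v - 1) 0 = pvLb p v) →
    pvKmpWhile p fl c fuel k0 ≤ k0 ∧
    p.take (pvKmpWhile p fl c fuel k0) <:+ t ∧
    (c = p.getD (pvKmpWhile p fl c fuel k0) ' ' ∨ pvKmpWhile p fl c fuel k0 = 0) ∧
    (∀ i, i ≤ k0 → p.take i <:+ t → c = p.getD i ' ' → i ≤ pvKmpWhile p fl c fuel k0) := by
  intro fuel
  induction fuel with
  | zero =>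
      intro k0 hf _ _ _
      have : k0 = 0 := by omega
      subst this
      simp [pvKmpWhile]
  | succ f ih =>
      intro k0 hf hlt hsuf hT
      match k0, hf with
      | 0, _ => simp [pvKmpWhile]
      | v + 1, hf =>
          by_cases hc : c = p.getD (v + 1) ' '
          · rw [show pvKmpWhile p fl c (f + 1) (v + 1) = v + 1 by rw [pvKmpWhile, if_pos hc]]
            exact ⟨le_refl _, hsuf, Or.inl hc, fun i hi _ _ => hi⟩
          · rw [show pvKmpWhile p fl c (f + 1) (v + 1)
                = pvKmpWhile p fl c f (fl.getD v 0) by rw [pvKmpWhile, if_neg hc]]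
            have hT1 : fl.getD v 0 = pvLb p (v + 1) := by
              have := hT (v + 1) (by omega) (le_refl _); simpa using this
            rw [hT1]
            have hlb_le : pvLb p (v + 1) ≤ v := by have := pvLb_le p (v + 1); omega
            have hsuf' : p.take (pvLb p (v + 1)) <:+ t :=
              (pvLb_suffix p (v + 1)).trans hsuf
            have hmain := ih (pvLb p (v + 1)) (by omega) (by omega) hsuf'
              (fun w h1 h2 => hT w h1 (by omega))
            refine ⟨hmain.1.trans (by omega), hmain.2.1, hmain.2.2.1, ?_⟩
            intro i hi hsufi hci
            have hiv : i ≤ v := by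
              by_contra hgt
              have hiv1 : i = v + 1 := by omega
              subst hiv1
              exact hc hci
            have : p.take i <:+ p.take (v + 1) :=
              pvCH p t (v + 1) i hsuf (by omega) (by omega) hsufi
            exact hmain.2.2.2 i (pvLb_max p (v + 1) i (by omega) this) hsufi hci
  
-- one automaton step computes the maximum for t ++ [c]
theorem pvStep_spec (p t : List Char) (fl : List Nat) (c : Char) (b k0 : Nat)
    (hb : b ≤ p.length) (hk0 : k0 < p.length) (hkb : k0 + 1 ≤ b)
    (hsuf : p.take k0 <:+ t)
    (hmax : ∀ i, i + 1 ≤ b → p.take i <:+ t → i ≤ k0)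
    (hT : ∀ v, 1 ≤ v → v ≤ k0 → fl.getD (v - 1) 0 = pvLb p v) :
    (if c = p.getD (pvKmpWhile p fl c k0 k0) ' '
      then pvKmpWhile p fl c k0 k0 + 1 else pvKmpWhile p fl c k0 k0)
      = pvDescendB (t ++ [c]) p b := by
  obtain ⟨hWle, hWsuf, hWexit, hWmax⟩ := pvKmpWhile_spec p t fl c k0 k0 (le_refl _) hk0 hsuf hT
  set W := pvKmpWhile p fl c k0 k0 with hW
  apply le_antisymm
  · -- result ≤ max: the result length is achieved by a genuine suffix
    by_cases hc : c = p.getD W ' '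
    · rw [if_pos hc]
      apply pvDescendB_max _ _ _ _ (by omega)
      rw [pvF1 p t c (W + 1) (by omega) (by omega)]
      exact ⟨by simpa using hWsuf, by simpa using hc⟩
    · rw [if_neg hc]
      rcases hWexit with h | h
      · exact absurd h hc
      · rw [h]; exact Nat.zero_le _
  · -- max ≤ result
    set M := pvDescendB (t ++ [c]) p b with hM
    rcases Nat.eq_zero_or_pos M with h0 | hpos
    · rw [h0]; exact Nat.zero_le _
    · have hMle : M ≤ b := pvDescendB_le _ _ _
      have hMsuf : p.take M <:+ t ++ [c] := pvDescendB_suffix _ _ _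
      rw [pvF1 p t c M (by omega) (by omega)] at hMsuf
      obtain ⟨hMs, hMc⟩ := hMsuf
      have hik0 : M - 1 ≤ k0 := hmax (M - 1) (by omega) hMs
      have hiW : M - 1 ≤ W := hWmax (M - 1) hik0 hMs hMc
      have hcW : c = p.getD W ' ' := by
        rcases hWexit with h | h
        · exact h
        · rw [h] at hiW ⊢
          have : M = 1 := by omega
          rw [this] at hMc; simpa using hMc
      rw [if_pos hcW]; omega

-- the fold of the failure-table build, stopped after the range 1..I-1 (proof-side abbreviation)
def pvFailPartial (p : List Char) (m I : Nat) : List Nat × Nat :=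
  (PySem.List.pyRange 1 (I : Int) 1).foldl
    (fun (st : List Nat × Nat) (i : Int) =>
      let c := p.getD i.toNat ' '
      let k := pvKmpWhile p st.1 c st.2 st.2
      let k := if c = p.getD k ' ' then k + 1 else k
      (st.1.set i.toNat k, k))
    (List.replicate m 0, 0)

theorem pvFailFold_eq_partial (p : List Char) (m : Nat) :
    pvFailFold p m = pvFailPartial p m m := rfl

-- the failure-table build establishes the table property
theorem pvFailPartial_spec (p : List Char) (m : Nat) (hm : p.length = m) :
    ∀ I, 1 ≤ I → I ≤ m →
    (pvFailPartial p m I).1.length = m ∧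
    (pvFailPartial p m I).2 = pvLb p I ∧
    (∀ j, j < I → (pvFailPartial p m I).1.getD j 0 = pvLb p (j + 1)) := by
  intro I h1 hIm
  induction I, h1 using Nat.le_induction with
  | base =>
      have hnil : PySem.List.pyRange 1 ((1 : Nat) : Int) 1 = [] := by
        simp
      unfold pvFailPartial
      rw [hnil, List.foldl_nil]
      refine ⟨by simp, by simp [pvLb, pvDescendB], ?_⟩
      intro j hj
      have : j = 0 := by omega
      subst this
      simp [pvLb, pvDescendB, List.getD, List.getElem?_replicate]
      split <;> rfl
  | succ n hn ih =>
      obtain ⟨ihlen, ihk, ihtab⟩ := ih (by omega)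
      have hr : PySem.List.pyRange 1 (((n + 1 : Nat)) : Int) 1
          = PySem.List.pyRange 1 ((n : Nat) : Int) 1 ++ [((n : Nat) : Int)] := by
        push_cast
        exact PySem.List.pyRange_one_succ_right (by exact_mod_cast hn)
      have hsp : pvFailPartial p m (n + 1) =
          (fun (st : List Nat × Nat) (i : Int) =>
            let c := p.getD i.toNat ' '
            let k := pvKmpWhile p st.1 c st.2 st.2
            let k := if c = p.getD k ' ' then k + 1 else k
            (st.1.set i.toNat k, k)) (pvFailPartial p m n) ((n : Nat) : Int) := by
        unfold pvFailPartial
        rw [hr, List.foldl_append, List.foldl_cons, List.foldl_nil]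
      rw [hsp]
      dsimp only
      simp only [Int.toNat_natCast]
      rw [ihk]
      have hnm : n < m := by omega
      have hlb : pvLb p n ≤ n - 1 := pvLb_le p n
      have hT : ∀ v, 1 ≤ v → v ≤ pvLb p n →
          (pvFailPartial p m n).1.getD (v - 1) 0 = pvLb p v := by
        intro v hv1 hv2
        have := ihtab (v - 1) (by omega)
        rwa [Nat.sub_add_cancel hv1] at this
      have hk1 : (if p.getD n ' ' = p.getD (pvKmpWhile p (pvFailPartial p m n).1
              (p.getD n ' ') (pvLb p n) (pvLb p n)) ' '
            then pvKmpWhile p (pvFailPartial p m n).1 (p.getD n ' ') (pvLb p n) (pvLb p n) + 1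
            else pvKmpWhile p (pvFailPartial p m n).1 (p.getD n ' ') (pvLb p n) (pvLb p n))
          = pvLb p (n + 1) := by
        rw [pvStep_spec p (p.take n) (pvFailPartial p m n).1 (p.getD n ' ') n (pvLb p n)
          (by omega) (by omega) (by omega) (pvLb_suffix p n)
          (fun i hi hs => pvLb_max p n i (by omega) hs) hT]
        rw [← pvTake_succ p n (by omega)]
        simp [pvLb]
      rw [hk1]
      refine ⟨by simp [ihlen], rfl, ?_⟩
      intro j hj
      by_cases hjn : j = n
      · rw [hjn]
        have hjlen : n < (pvFailPartial p m n).1.length := by omega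
        simp [List.getD, List.getElem?_set_self hjlen]
      · have hjlt : j < n := by omega
        simp only [List.getD, List.getElem?_set_ne (show n ≠ j by omega)]
        have := ihtab j hjlt
        simpa [List.getD] using this

-- with a correct table, the automaton run computes the maximum with bound m
theorem pvKmpRun_spec (p : List Char) (fl : List Nat) (m : Nat) (hm : p.length = m)
    (hm1 : 1 ≤ m) (hT : ∀ j, j < m → fl.getD j 0 = pvLb p (j + 1)) :
    ∀ t, pvKmpRun p fl m t = pvDescendB t p m := by
  intro t
  induction t using List.reverseRecOn with
  | nil =>
      rw [pvKmpRun, List.foldl_nil, pvDescendB_nil p m (by omega)]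
  | append_singleton t c ih =>
      rw [pvKmpRun] at ih ⊢
      rw [List.foldl_append, List.foldl_cons, List.foldl_nil, ih]
      dsimp only
      have hm' : (m - 1) + 1 = m := by omega
      have hfl : fl.getD (m - 1) 0 = pvLb p m := by
        have := hT (m - 1) (by omega); rwa [hm'] at this
      have hKle : pvDescendB t p m ≤ m := pvDescendB_le t p m
      have hKsuf : p.take (pvDescendB t p m) <:+ t := pvDescendB_suffix t p m
      rcases eq_or_lt_of_le hKle with hKm | hKm
      · rw [if_pos hKm, hKm, hfl]
        have hlb : pvLb p m ≤ m - 1 := pvLb_le p m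
        have hpm : p.take m <:+ t := by rw [← hKm]; exact hKsuf
        refine pvStep_spec p t fl c m (pvLb p m) (by omega) (by omega) (by omega)
          ((pvLb_suffix p m).trans hpm) ?_ ?_
        · intro i hi hs
          exact pvLb_max p m i (by omega) (pvCH p t m i hpm (by omega) (by omega) hs)
        · intro v hv1 hv2
          have := hT (v - 1) (by omega)
          rwa [Nat.sub_add_cancel hv1] at this
      · have hne : ¬(pvDescendB t p m = m) := by omega
        rw [if_neg hne]
        refine pvStep_spec p t fl c m (pvDescendB t p m) (by omega) (by omega) (by omega)
          hKsuf ?_ ?_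
        · intro i hi hs
          exact pvDescendB_max t p m i (by omega) hs
        · intro v hv1 hv2
          have := hT (v - 1) (by omega)
          rwa [Nat.sub_add_cancel hv1] at this

theorem pvOverlapB_eq (t pat : List Char) :
    pvOverlapB t pat = pvDescendB t pat pat.length := by
  unfold pvOverlapB
  dsimp only
  by_cases h0 : pat.length = 0
  · rw [if_pos h0, h0]
    simp [pvDescendB]
  · rw [if_neg h0, pvFailFold_eq_partial]
    obtain ⟨hlen, hk, htab⟩ := pvFailPartial_spec pat pat.length rfl pat.length (by omega) (le_refl _)
    exact pvKmpRun_spec pat (pvFailPartial pat pat.length pat.length).1 pat.length rfl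
      (by omega) htab t

theorem pvStep_eq (res np : List Char) : pvStepA res np = pvStepB res np := by
  unfold pvStepA pvStepB
  dsimp only
  set m : Nat := min (min res.length np.length) 400 with hmdef
  have hmr : m ≤ res.length := le_trans (min_le_left _ _) (min_le_left _ _)
  have hmn : m ≤ np.length := le_trans (min_le_left _ _) (min_le_right _ _)
  have hmint : min (min (res.length : Int) (np.length : Int)) 400 = (m : Int) := by
    rw [hmdef]; push_cast; omega
  rw [hmint, pvFindOverlapA_eq res np m]
  have hpatlen : (np.take m).length = m := by rw [List.length_take]; omega
  rw [pvOverlapB_eq, hpatlen]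
  have hdesc : pvDescendB res np m
      = pvDescendB (res.drop (res.length - m)) (np.take m) m := by
    apply pvDescendB_congr
    intro j h1 hj
    rw [List.take_take, min_eq_left hj]
    exact pvSuffix_tail_iff res (np.take j) m hmr (by simp; omega)
  rw [← hdesc]
  congr 1
  simp [PySem.List.slice_from_natCast]

theorem pvFold_eq (init : List Char) (l : List String) :
    l.foldl (fun res np => pvStepA res np.toList) init
      = l.foldl (fun res np => pvStepB res np.toList) init := by
  induction l generalizing init with
  | nil => rfl
  | cons x l _ => simp only [List.foldl_cons, pvStep_eq]

-- ===== VERDICT (by name: the statement is the Claim_ definition above) =====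
theorem deduplicate_overlapping_chunks_py_spec : Claim_equal_deduplicate_overlapping_chunks_py := by
  intro parts _
  unfold Spec_deduplicate_overlapping_chunks_py
  unfold deduplicate_overlapping_chunks_py deduplicate_overlapping_chunks_py_alt
  by_cases h0 : parts = []
  · simp [h0]
  · rw [if_neg h0, if_neg h0]
    by_cases h1 : parts.length = 1
    · match parts, h1 with
      | [p], _ => simp
    · rw [if_neg h1, pvFold_eq]
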